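-- pv_equiv track=rewrite | github.com/gkqkehs7/Algorithm | Book/book_18.py | balanced_str
-- ===== SOURCE A (Python) =====
-- def balanced_str(string):
--     count = 0;
--     result = 0;
--     for str in string:
--         if str == ")":
--             count += 1;
--         else:
--             count -=1;
--
--         result += 1;
--         if(count == 0):
--             return result;
-- ===== SOURCE B (Python) =====
-- def balanced_str(string):
--     # Two-phase: build the list of running balances, then find the first zero.
--     sums = []
--     total = 0
--     for c in string:
--         total += 1 if c == ")" else -1
--         sums.append(total)
--     for i, v in enumerate(sums):
--         if v == 0:
--             return i + 1
--     return None
-- ===== Notes on version B (the rewrite author's own statement) =====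
-- stated objective: alternative
-- what changed: B separates the scan into two phases: first materialise the list of running balances, then search it for the first zero, instead of A's single loop that updates a counter, a position and tests inline.
import Mathlib
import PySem

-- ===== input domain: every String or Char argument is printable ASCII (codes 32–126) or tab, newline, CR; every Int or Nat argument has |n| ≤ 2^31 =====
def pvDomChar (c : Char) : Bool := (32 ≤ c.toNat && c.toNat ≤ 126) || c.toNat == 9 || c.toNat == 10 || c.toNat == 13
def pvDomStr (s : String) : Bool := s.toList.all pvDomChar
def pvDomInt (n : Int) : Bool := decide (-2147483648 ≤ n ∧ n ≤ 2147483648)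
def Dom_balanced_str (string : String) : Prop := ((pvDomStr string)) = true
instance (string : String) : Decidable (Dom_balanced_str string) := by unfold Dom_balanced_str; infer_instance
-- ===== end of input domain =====

-- B splits A's inline scan into two phases: build the list of running balances, then find the first zero.


-- ===== PORT A =====
-- A's loop: count (+1 for ')', -1 otherwise), result counts positions; return result as soon as count = 0.
def balancedGo : List Char → Int → Int → Option Int
  | [], _, _ => none
  | c :: rest, count, result =>
    let count' := if c = ')' then count + 1 else count - 1
    let result' := result + 1
    if count' = 0 then some result' else balancedGo rest count' result'

def balanced_str (string : String) : Option Int :=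
  balancedGo string.toList 0 0

-- ===== PORT B =====
-- Phase 1: list of running balances.
def balancedSums : List Char → Int → List Int
  | [], _ => []
  | c :: rest, total =>
    let total' := total + (if c = ')' then 1 else -1)
    total' :: balancedSums rest total'

-- Phase 2: first index whose value is zero (1-based).
def firstZero : List Int → Int → Option Int
  | [], _ => none
  | v :: rest, i => if v = 0 then some (i + 1) else firstZero rest (i + 1)

def balanced_str_alt (string : String) : Option Int :=
  firstZero (balancedSums string.toList 0) 0

-- ===== PRECONDITION & SPEC =====
def Spec_balanced_str (string : String) (out : Option Int) : Prop := out = balanced_str_alt string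
instance (string : String) (out : Option Int) : Decidable (Spec_balanced_str string out) := by unfold Spec_balanced_str; infer_instance

-- ===== CLAIM (what is proved, stated in full; the proofs are below) =====
def Claim_equal_balanced_str : Prop := ∀ (string : String), Dom_balanced_str string → Spec_balanced_str string (balanced_str string)

-- ===== LEMMAS AND PROOFS =====
theorem balancedGo_eq (cs : List Char) : ∀ (count result : Int),
    balancedGo cs count result = firstZero (balancedSums cs count) result := by
  induction cs with
  | nil => intro _ _; rfl
  | cons c rest ih =>
    intro count result
    simp only [balancedGo, balancedSums, firstZero]
    by_cases h : c = ')'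
    · simp only [if_pos h]
      split <;> simp [ih]
    · simp only [if_neg h]
      have e : count + -1 = count - 1 := by ring
      rw [e]
      split <;> simp [ih]

-- ===== VERDICT (by name: the statement is the Claim_ definition above) =====
theorem balanced_str_spec : Claim_equal_balanced_str := by
  intro s _
  unfold Spec_balanced_str balanced_str balanced_str_alt
  exact balancedGo_eq _ 0 0
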